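-- pv_equiv track=rewrite | github.com/Felipecarrassai0085/automata-2024-t2 | src/automata.py | process
-- ===== SOURCE A (Python) =====
-- from typing import List, Tuple, Dict
--
-- def process(automata: Tuple[List[str], List[str], Dict[str, Dict[str, List[str]]], str, List[str]], word: List[str]) -> Dict[str, str]:
--     """
--     Processa uma palavra através de um autômato.
--
--     :param automata: Uma tupla contendo (Q, Sigma, delta, q0, F).
--     :param word: Lista de símbolos da palavra a ser processada.
--     :return: Um dicionário indicando se a palavra é aceita, rejeitada ou inválida.
--     """
--     Q, Sigma, delta, q0, F = automata
--
--     current_states = {q0}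
--     for symbol in word:
--         if symbol not in Sigma:
--             return {"Resultado": "INVÁLIDA"}
--         next_states = set()
--         for state in current_states:
--             if state in delta and symbol in delta[state]:
--                 next_states.update(delta[state][symbol])
--         current_states = next_states
--
--     if current_states & set(F):
--         return {"Resultado": "ACEITA"}
--     else:
--         return {"Resultado": "REJEITA"}
-- ===== SOURCE B (Python) =====
-- from typing import List, Tuple, Dict
--
-- def process(automata: Tuple[List[str], List[str], Dict[str, Dict[str, List[str]]], str, List[str]], word: List[str]) -> Dict[str, str]:
--     Q, Sigma, delta, q0, F = automata
--     if any(symbol not in Sigma for symbol in word):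
--         return {"Resultado": "INVÁLIDA"}
--     # Backward reachability: good = states from which the remaining suffix can reach F.
--     good = set(F)
--     for symbol in reversed(word):
--         good = {state for state, trans in delta.items()
--                 if any(t in good for t in trans.get(symbol, []))}
--     return {"Resultado": "ACEITA" if q0 in good else "REJEITA"}
-- ===== Notes on version B (the rewrite author's own statement) =====
-- stated objective: alternative
-- what changed: B validates the word up front and then runs the NFA backward: it folds over the reversed word computing the set of states from which the remaining suffix can reach F (starting from set(F)) and accepts iff q0 lands in that set, instead of A's forward subset simulation from {q0} intersected with F at the end.
import Mathlib
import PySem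

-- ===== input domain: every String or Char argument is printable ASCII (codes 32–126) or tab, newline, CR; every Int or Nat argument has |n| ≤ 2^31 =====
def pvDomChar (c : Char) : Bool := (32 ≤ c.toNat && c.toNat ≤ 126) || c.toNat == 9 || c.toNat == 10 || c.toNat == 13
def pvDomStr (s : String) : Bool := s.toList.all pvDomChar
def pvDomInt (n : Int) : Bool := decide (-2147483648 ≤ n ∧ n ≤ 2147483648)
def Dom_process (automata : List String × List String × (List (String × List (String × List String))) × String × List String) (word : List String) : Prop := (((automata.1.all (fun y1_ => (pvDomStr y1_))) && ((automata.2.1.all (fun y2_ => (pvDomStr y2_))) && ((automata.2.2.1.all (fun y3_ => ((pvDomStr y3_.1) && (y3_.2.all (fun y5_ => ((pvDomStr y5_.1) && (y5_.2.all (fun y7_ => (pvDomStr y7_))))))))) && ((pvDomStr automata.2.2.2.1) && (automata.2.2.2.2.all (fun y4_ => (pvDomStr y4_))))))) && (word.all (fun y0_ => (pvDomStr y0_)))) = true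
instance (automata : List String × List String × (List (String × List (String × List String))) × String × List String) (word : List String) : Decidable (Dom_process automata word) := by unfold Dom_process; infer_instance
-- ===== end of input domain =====

-- B replaces A's forward subset simulation by backward reachability: fold over the reversed word
-- computing the set of states from which the remaining suffix reaches F, then test q0 ('alternative').

-- ===== PORT A =====
-- A's loop over the word carries current_states and returns early at the first invalid symbol.
def processGo (Sigma : List String) (delta : List (String × List (String × List String)))
    (F : List String) : List String → PySem.Set String → List (String × String)
  | [], currentStates =>
    if (PySem.Set.inter currentStates (PySem.Set.ofList F)).isEmpty then
      [("Resultado", "REJEITA")]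
    else
      [("Resultado", "ACEITA")]
  | symbol :: rest, currentStates =>
    if Sigma.contains symbol then
      let nextStates : PySem.Set String :=
        currentStates.foldl (fun ns state =>
          match PySem.Dict.get? (PySem.Dict.mk delta) state with
          | some d =>
            match PySem.Dict.get? (PySem.Dict.mk d) symbol with
            | some l => l.foldl PySem.Set.add ns
            | none => ns
          | none => ns) PySem.Set.empty
      processGo Sigma delta F rest nextStates
    else
      [("Resultado", "INVÁLIDA")]

def process (automata : List String × List String × (List (String × List (String × List String))) × String × List String) (word : List String) : List (String × String) :=
  match automata with
  | (_Q, Sigma, delta, q0, F) => processGo Sigma delta F word (PySem.Set.ofList [q0])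

-- ===== PORT B =====
-- one backward step: the states whose transitions on `symbol` meet `good`
-- ({state for state, trans in delta.items() if any(t in good for t in trans.get(symbol, []))})
def backStep (delta : List (String × List (String × List String)))
    (good : PySem.Set String) (symbol : String) : PySem.Set String :=
  PySem.Set.ofList ((delta.filter (fun p =>
    ((PySem.Dict.get? (PySem.Dict.mk p.2) symbol).getD []).any (fun t => good.contains t))).map (·.1))

def process_alt (automata : List String × List String × (List (String × List (String × List String))) × String × List String) (word : List String) : List (String × String) :=
  match automata with
  | (_Q, Sigma, delta, q0, F) =>
    if word.any (fun symbol => !(Sigma.contains symbol)) then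
      [("Resultado", "INVÁLIDA")]
    else
      let good : PySem.Set String :=
        word.reverse.foldl (fun g symbol => backStep delta g symbol) (PySem.Set.ofList F)
      if good.contains q0 then
        [("Resultado", "ACEITA")]
      else
        [("Resultado", "REJEITA")]

-- ===== PRECONDITION & SPEC =====
-- Pre_ requires the outer transition table (the Lean image of the Python dict `delta`) to have
-- pairwise-distinct keys: duplicate keys represent no Python dict, so this excludes no Python input.
def Pre_process (automata : List String × List String × (List (String × List (String × List String))) × String × List String) (word : List String) : Prop :=
  (automata.2.2.1.map (·.1)).Nodup
instance (automata : List String × List String × (List (String × List (String × List String))) × String × List String) (word : List String) : Decidable (Pre_process automata word) := by unfold Pre_process; infer_instance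
def pvWitness_process : (List String × List String × (List (String × List (String × List String))) × String × List String) × List String :=
  ((["q0", "q1"], ["a", "b"], [("q0", [("a", ["q1"])]), ("q1", [("b", ["q1"])])], "q0", ["q1"]), ["a", "b"])
def Spec_process (automata : List String × List String × (List (String × List (String × List String))) × String × List String) (word : List String) (out : List (String × String)) : Prop := out = process_alt automata word
instance (automata : List String × List String × (List (String × List (String × List String))) × String × List String) (word : List String) (out : List (String × String)) : Decidable (Spec_process automata word out) := by unfold Spec_process; infer_instance

-- ===== CLAIM (what is proved, stated in full; the proofs are below) =====
def Claim_equal_process : Prop := ∀ (automata : List String × List String × (List (String × List (String × List String))) × String × List String) (word : List String), Dom_process automata word → Pre_process automata word → Spec_process automata word (process automata word)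

-- ===== LEMMAS AND PROOFS =====

-- moves(state, symbol) as A's forward step reads it: first-match lookup, [] when absent
def movesOf (delta : List (String × List (String × List String))) (state symbol : String) : List String :=
  match PySem.Dict.get? (PySem.Dict.mk delta) state with
  | some d => (PySem.Dict.get? (PySem.Dict.mk d) symbol).getD []
  | none => []

-- A's one-symbol forward step is the dedup of the concatenated moves of the current states
theorem step_eq (delta : List (String × List (String × List String)))
    (cur : PySem.Set String) (symbol : String) :
    List.foldl (fun (ns : PySem.Set String) state =>
        match PySem.Dict.get? (PySem.Dict.mk delta) state with
        | some d =>
          match PySem.Dict.get? (PySem.Dict.mk d) symbol with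
          | some l => l.foldl PySem.Set.add ns
          | none => ns
        | none => ns) PySem.Set.empty cur
      = PySem.Set.ofList (List.flatMap (fun s => movesOf delta s symbol) cur) := by
  rw [PySem.Set.ofList_eq_foldl, List.foldl_flatMap]
  have hf : (fun (ns : PySem.Set String) state =>
      match PySem.Dict.get? (PySem.Dict.mk delta) state with
      | some d =>
        match PySem.Dict.get? (PySem.Dict.mk d) symbol with
        | some l => List.foldl PySem.Set.add ns l
        | none => ns
      | none => ns)
      = (fun (acc : PySem.Set String) state =>
          List.foldl PySem.Set.add acc (movesOf delta state symbol)) := by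
    funext ns state
    unfold movesOf
    rcases hd : PySem.Dict.get? (PySem.Dict.mk delta) state with _ | d <;> simp
    rcases h2 : PySem.Dict.get? (PySem.Dict.mk d) symbol with _ | l <;> simp
  rw [hf]
  rfl

-- on an assoc list with pairwise-distinct keys, first-match lookup of a member's key finds it
theorem find?_key_of_nodup {ν : Type} (l : List (String × ν)) (p : String × ν)
    (hnd : (l.map (·.1)).Nodup) (hp : p ∈ l) : l.find? (fun q => q.1 == p.1) = some p := by
  induction l with
  | nil => simp at hp
  | cons a rest ih =>
    simp only [List.map_cons, List.nodup_cons] at hnd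
    rcases List.mem_cons.mp hp with rfl | hp'
    · simp [List.find?]
    · have hne : a.1 ≠ p.1 := fun he => hnd.1 (he ▸ List.mem_map_of_mem hp')
      rw [List.find?_cons_of_neg (by simp [hne]), ih hnd.2 hp']

-- with nodup outer keys, membership in B's backward step is "some move lands in good"
theorem mem_backStep (delta : List (String × List (String × List String)))
    (hnd : (delta.map (·.1)).Nodup) (good : PySem.Set String) (symbol u : String) :
    u ∈ backStep delta good symbol ↔ ∃ t ∈ movesOf delta u symbol, t ∈ good := by
  unfold backStep
  rw [PySem.Set.mem_ofList]
  simp only [List.mem_map, List.mem_filter]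
  constructor
  · rintro ⟨p, ⟨hp, hany⟩, rfl⟩
    have hfind : List.find? (fun q => q.1 == p.1) delta = some p :=
      find?_key_of_nodup delta p hnd hp
    have hmv : movesOf delta p.1 symbol
        = (PySem.Dict.get? (PySem.Dict.mk p.2) symbol).getD [] := by
      unfold movesOf PySem.Dict.get?
      simp [hfind]
    rw [hmv]
    rcases List.any_eq_true.mp hany with ⟨t, ht, hgt⟩
    exact ⟨t, ht, by simpa [PySem.Set.contains] using hgt⟩
  · rintro ⟨t, ht, hgt⟩
    unfold movesOf at ht
    rcases hd : PySem.Dict.get? (PySem.Dict.mk delta) u with _ | d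
    · rw [hd] at ht; simp at ht
    · rw [hd] at ht
      unfold PySem.Dict.get? at hd
      rcases hfind : List.find? (fun q => q.1 == u) delta with _ | p
      · simp [hfind] at hd
      · simp only [hfind, Option.map_some] at hd
        have hpd : p.2 = d := by simpa using hd
        have hpu : p.1 = u := by
          have := List.find?_some hfind
          simpa using this
        refine ⟨p, ⟨List.mem_of_find?_eq_some hfind, ?_⟩, hpu⟩
        rw [hpd]
        exact List.any_eq_true.mpr ⟨t, ht, by simpa [PySem.Set.contains] using hgt⟩

-- on an all-valid word, A's loop is the forward fold followed by the final intersection test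
theorem processGo_valid (Sigma : List String) (delta : List (String × List (String × List String)))
    (F : List String) (word : List String) (cur : PySem.Set String)
    (h : ∀ s ∈ word, Sigma.contains s) :
    processGo Sigma delta F word cur =
      (if (PySem.Set.inter
            (word.foldl (fun states symbol =>
              PySem.Set.ofList (states.flatMap (fun s => movesOf delta s symbol))) cur)
            (PySem.Set.ofList F)).isEmpty then
        [("Resultado", "REJEITA")]
      else
        [("Resultado", "ACEITA")]) := by
  induction word generalizing cur with
  | nil => rfl
  | cons symbol rest ih =>
    have hs : Sigma.contains symbol := h symbol (by simp)
    simp only [processGo, hs, if_true, List.foldl_cons]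
    rw [step_eq]
    exact ih _ (fun s hm => h s (by simp [hm]))

-- a word containing an invalid symbol makes A's loop return INVÁLIDA
theorem processGo_invalid (Sigma : List String) (delta : List (String × List (String × List String)))
    (F : List String) (word : List String) (cur : PySem.Set String)
    (h : ∃ s ∈ word, ¬ Sigma.contains s) :
    processGo Sigma delta F word cur = [("Resultado", "INVÁLIDA")] := by
  induction word generalizing cur with
  | nil => simp at h
  | cons symbol rest ih =>
    by_cases hs : Sigma.contains symbol
    · simp only [processGo, hs, if_true]
      refine ih _ ?_
      rcases h with ⟨s, hm, hns⟩
      rcases List.mem_cons.mp hm with rfl | hm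
      · exact absurd hs hns
      · exact ⟨s, hm, hns⟩
    · simp only [processGo]
      rw [if_neg hs]

-- the forward fold meets F iff some current state lies in the backward (foldr) set
theorem accept_iff (delta : List (String × List (String × List String)))
    (hnd : (delta.map (·.1)).Nodup) (F : List String) (word : List String)
    (cur : PySem.Set String) :
    (¬ (PySem.Set.inter
        (word.foldl (fun states symbol =>
          PySem.Set.ofList (states.flatMap (fun s => movesOf delta s symbol))) cur)
        (PySem.Set.ofList F)).isEmpty = true)
      ↔ ∃ s ∈ cur, s ∈ word.foldr (fun symbol g => backStep delta g symbol) (PySem.Set.ofList F) := by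
  induction word generalizing cur with
  | nil =>
    simp only [List.foldl_nil, List.foldr_nil]
    unfold PySem.Set.inter
    rw [List.isEmpty_iff, List.filter_eq_nil_iff]
    push Not
    constructor
    · rintro ⟨s, hs, hc⟩
      exact ⟨s, hs, by simpa [PySem.Set.contains] using hc⟩
    · rintro ⟨s, hs, hm⟩
      exact ⟨s, hs, by simpa [PySem.Set.contains] using hm⟩
  | cons symbol rest ih =>
    simp only [List.foldl_cons, List.foldr_cons]
    rw [ih]
    constructor
    · rintro ⟨s, hs, hg⟩
      rw [PySem.Set.mem_ofList, List.mem_flatMap] at hs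
      rcases hs with ⟨u, hu, ht⟩
      exact ⟨u, hu, (mem_backStep delta hnd _ symbol u).mpr ⟨s, ht, hg⟩⟩
    · rintro ⟨u, hu, hb⟩
      rcases (mem_backStep delta hnd _ symbol u).mp hb with ⟨t, ht, htg⟩
      refine ⟨t, ?_, htg⟩
      rw [PySem.Set.mem_ofList, List.mem_flatMap]
      exact ⟨u, hu, ht⟩

-- ===== VERDICT (by name: the statement is the Claim_ definition above) =====
theorem process_spec : Claim_equal_process := by
  intro automata word _ hpre
  obtain ⟨Q, Sigma, delta, q0, F⟩ := automata
  have hnd : (delta.map (·.1)).Nodup := hpre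
  simp only [Spec_process, process, process_alt]
  by_cases hinv : word.any (fun symbol => !(Sigma.contains symbol))
  · rw [if_pos hinv]
    refine processGo_invalid _ _ _ _ _ ?_
    rcases List.any_eq_true.mp hinv with ⟨s, hm, hns⟩
    exact ⟨s, hm, by simpa using hns⟩
  · rw [if_neg hinv]
    have hval : ∀ s ∈ word, Sigma.contains s := by
      intro s hm
      by_contra hns
      exact hinv (List.any_eq_true.mpr ⟨s, hm, by simpa using hns⟩)
    rw [processGo_valid Sigma delta F word _ hval]
    have hiff := accept_iff delta hnd F word (PySem.Set.ofList [q0])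
    rw [List.foldl_reverse]
    simp only [PySem.Set.ofList, PySem.Set.add, PySem.Set.empty, List.foldl_cons,
      List.foldl_nil] at hiff ⊢
    by_cases hq : (List.foldr (fun symbol g => backStep delta g symbol)
        (List.foldl PySem.Set.add [] F) word).contains q0
    · rw [if_neg ?_, if_pos hq]
      rw [hiff]
      exact ⟨q0, by simp [PySem.Set.contains] at hq ⊢; exact hq⟩
    · rw [if_pos ?_, if_neg hq]
      by_contra hne
      rcases hiff.mp hne with ⟨s, hs, hg⟩
      have : s = q0 := by simpa [PySem.Set.contains, PySem.Set.add, PySem.Set.empty] using hs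
      subst this
      exact absurd (by simpa [PySem.Set.contains] using hg) (by simpa using hq)
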